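-- pv_equiv track=rewrite | github.com/DiamondLightSource/FastCS | tests/transport/graphQL/test_graphQL.py | nest_query
-- ===== SOURCE A (Python) =====
-- import copy
--
-- def nest_query(path: list[str]) -> str:
--     queue = copy.deepcopy(path)
--     field = queue.pop(0)
--
--     if queue:
--         nesting = nest_query(queue)
--         return f"{field} {{ {nesting} }} "
--     else:
--         return field
-- ===== SOURCE B (Python) =====
-- def nest_query(path: list[str]) -> str:
--     # Closed form: join fields with " { " and close all brackets at the end.
--     return " { ".join(path) + " } " * (len(path) - 1)
-- ===== Notes on version B (the rewrite author's own statement) =====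
-- stated objective: faster
-- what changed: Replaces the recursion with per-level deepcopy and pop(0) by a closed-form single join plus a repeated closing-bracket suffix.
import Mathlib
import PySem

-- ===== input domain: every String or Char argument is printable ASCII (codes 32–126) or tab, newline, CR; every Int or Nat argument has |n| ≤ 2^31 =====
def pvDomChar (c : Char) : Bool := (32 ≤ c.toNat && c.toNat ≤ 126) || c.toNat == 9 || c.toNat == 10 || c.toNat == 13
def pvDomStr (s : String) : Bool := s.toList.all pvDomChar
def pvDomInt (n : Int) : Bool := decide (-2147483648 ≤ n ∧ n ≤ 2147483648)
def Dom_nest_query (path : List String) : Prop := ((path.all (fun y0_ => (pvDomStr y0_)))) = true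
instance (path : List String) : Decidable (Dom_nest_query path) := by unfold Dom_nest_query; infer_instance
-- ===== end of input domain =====

-- B replaces A's recursion (deepcopy + pop(0) per level, O(n^2)) by a closed-form join plus a repeated closing suffix (O(n)).

-- ===== PORT A =====
-- A: queue = deepcopy(path); field = queue.pop(0)  (IndexError on []); recurse on the rest.
def nest_query (path : List String) : String :=
  match path with
  | [] => ""        -- Python raises IndexError here; excluded by Pre_nest_query
  | field :: queue =>
    if queue ≠ [] then field ++ " { " ++ nest_query queue ++ " } "
    else field

-- ===== PORT B =====
-- B: " { ".join(path) + " } " * (len(path) - 1)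
def nest_query_alt (path : List String) : String :=
  PySem.Str.join " { " path ++ String.join (List.replicate (path.length - 1) " } ")

-- ===== PRECONDITION & SPEC =====
-- Pre_ excludes only the empty list, on which A raises IndexError.
def Pre_nest_query (path : List String) : Prop := path ≠ []
instance (path : List String) : Decidable (Pre_nest_query path) := by unfold Pre_nest_query; infer_instance
def pvWitness_nest_query : List String := (["a", "b"])

def Spec_nest_query (path : List String) (out : String) : Prop := out = nest_query_alt path
instance (path : List String) (out : String) : Decidable (Spec_nest_query path out) := by unfold Spec_nest_query; infer_instance

-- ===== CLAIM (what is proved, stated in full; the proofs are below) =====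
def Claim_equal_nest_query : Prop := ∀ (path : List String), Dom_nest_query path → Pre_nest_query path → Spec_nest_query path (nest_query path)

-- ===== LEMMAS AND PROOFS =====

theorem rep_snoc (n : Nat) (s : List Char) :
    (List.replicate (n + 1) s).flatten = (List.replicate n s).flatten ++ s := by
  induction n with
  | zero => simp
  | succ m ih =>
    have h : s ++ (List.replicate m s).flatten = (List.replicate m s).flatten ++ s := by
      calc s ++ (List.replicate m s).flatten
          = (List.replicate (m + 1) s).flatten := by rw [List.replicate_succ, List.flatten_cons]
        _ = (List.replicate m s).flatten ++ s := ih
    rw [List.replicate_succ, List.flatten_cons, ih, ← List.append_assoc, h]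

theorem equal_aux : ∀ (path : List String), path ≠ [] →
    (nest_query path).toList = (nest_query_alt path).toList := by
  intro path
  induction path with
  | nil => intro h; exact absurd rfl h
  | cons f rest ih =>
    intro _
    cases rest with
    | nil =>
      simp [nest_query, nest_query_alt, PySem.Str.toList_join, PySem.Chars.join_singleton,
        String.join]
    | cons g t =>
      have hr := ih (by simp)
      have lhs : nest_query (f :: g :: t) = f ++ " { " ++ nest_query (g :: t) ++ " } " := by
        simp [nest_query]
      simp only [nest_query_alt, String.toList_append, String.toList_join, List.map_replicate,
        List.length_cons, Nat.add_sub_cancel, PySem.Str.toList_join, List.map_cons] at hr ⊢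
      rw [lhs, String.toList_append, String.toList_append, String.toList_append, hr,
        PySem.Chars.join_cons_cons, rep_snoc]
      simp [List.append_assoc]

-- ===== VERDICT (by name: the statement is the Claim_ definition above) =====
theorem nest_query_spec : Claim_equal_nest_query := by
  intro path _ hpre
  unfold Spec_nest_query
  exact String.toList_inj.mp (equal_aux path hpre)
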